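-- pv_equiv track=rewrite | github.com/HamingnottT/coding-exercises | python/imocha/challenges/skill_easy/array_faulty_terrain/main.py | removeCoach
-- ===== SOURCE A (Python) =====
-- def removeCoach(N, K, A):
--     alphabet = ['A','B','C','D','E','F','G','H','I','J','K','L','M','N','O','P','q','R','S','T','U','V','W','X','Y','Z']
--     A_dict = {}
--
--     def getList(dict):
--         return list(dict.keys())
--
--     for i in range(0, len(A)):
--         A_dict[alphabet[i]] = A[i]
--
--     for i in range(0, len(A)):
--         if A[i] < K: del A_dict[alphabet[i]]
--
--     result = " ".join([str(value) for value in getList(A_dict)])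
--
--     return result
-- ===== SOURCE B (Python) =====
-- def removeCoach(N, K, A):
--     alphabet = ['A','B','C','D','E','F','G','H','I','J','K','L','M','N','O','P','q','R','S','T','U','V','W','X','Y','Z']
--     return " ".join(c for c, v in zip(alphabet, A) if v >= K)
-- ===== Notes on version B (the rewrite author's own statement) =====
-- stated objective: simpler
-- what changed: B drops A's two-phase dict strategy (materialize a full letter->value dict, then a deletion pass removing entries below K) and index arithmetic entirely: it pairs letters with values via zip and selects pairs with value >= K in one structural pass.
import Mathlib
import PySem

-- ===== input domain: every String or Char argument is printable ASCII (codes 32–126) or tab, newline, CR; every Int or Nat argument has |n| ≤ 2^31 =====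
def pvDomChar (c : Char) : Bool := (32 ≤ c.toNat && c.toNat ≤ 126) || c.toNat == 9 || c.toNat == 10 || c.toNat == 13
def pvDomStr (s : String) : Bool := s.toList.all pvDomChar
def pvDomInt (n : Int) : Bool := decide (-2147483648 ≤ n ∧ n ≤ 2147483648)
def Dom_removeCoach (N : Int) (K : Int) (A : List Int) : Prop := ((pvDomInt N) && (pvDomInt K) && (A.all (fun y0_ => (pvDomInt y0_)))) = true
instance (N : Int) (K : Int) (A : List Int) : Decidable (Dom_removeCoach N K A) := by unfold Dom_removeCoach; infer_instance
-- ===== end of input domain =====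

-- B replaces A's two-phase build-dict-then-delete (with index arithmetic) by a single
-- structural selection pass over the letter/value pairs (objective: simpler).

-- ===== PORT A =====
-- the alphabet literal of A
def pvAlphabet : List String :=
  ["A","B","C","D","E","F","G","H","I","J","K","L","M","N","O","P","q","R","S","T","U","V","W","X","Y","Z"]

-- getList(dict) = list(dict.keys())
def pvGetList (d : PySem.Dict String Int) : List String := d.keys

def removeCoach (N : Int) (K : Int) (A : List Int) : String :=
  let alphabet := pvAlphabet
  -- for i in range(0, len(A)): A_dict[alphabet[i]] = A[i]   (indices in range, so pyGetD is exact)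
  let d1 : PySem.Dict String Int :=
    (PySem.List.pyRange 0 (A.length : Int) 1).foldl
      (fun d i => d.insert (PySem.List.pyGetD alphabet i "") (PySem.List.pyGetD A i 0)) PySem.Dict.empty
  -- for i in range(0, len(A)): if A[i] < K: del A_dict[alphabet[i]]
  let d2 : PySem.Dict String Int :=
    (PySem.List.pyRange 0 (A.length : Int) 1).foldl
      (fun d i => if PySem.List.pyGetD A i 0 < K then d.erase (PySem.List.pyGetD alphabet i "") else d) d1
  -- " ".join([str(value) for value in getList(A_dict)])   (str on a str is the identity)
  PySem.Str.join " " ((pvGetList d2).map (fun value => value))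

-- ===== PORT B =====
-- the generator 'c for c, v in zip(alphabet, A) if v >= K', as structural recursion on the pairs
def pvSelect (K : Int) : List (String × Int) → List String
  | [] => []
  | (c, v) :: rest => if K ≤ v then c :: pvSelect K rest else pvSelect K rest

def removeCoach_alt (N : Int) (K : Int) (A : List Int) : String :=
  PySem.Str.join " " (pvSelect K (pvAlphabet.zip A))

-- ===== PRECONDITION & SPEC =====
-- Pre_ excludes len(A) > 26, where the Python A raises IndexError (alphabet[i] out of range).
def Pre_removeCoach (N : Int) (K : Int) (A : List Int) : Prop := A.length ≤ 26
instance (N : Int) (K : Int) (A : List Int) : Decidable (Pre_removeCoach N K A) := by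
  unfold Pre_removeCoach; infer_instance

def pvWitness_removeCoach : Int × Int × List Int := (3, 2, [1, 2, 3])

def Spec_removeCoach (N : Int) (K : Int) (A : List Int) (out : String) : Prop := out = removeCoach_alt N K A
instance (N : Int) (K : Int) (A : List Int) (out : String) : Decidable (Spec_removeCoach N K A out) := by unfold Spec_removeCoach; infer_instance

-- ===== CLAIM (what is proved, stated in full; the proofs are below) =====
def Claim_equal_removeCoach : Prop := ∀ (N : Int) (K : Int) (A : List Int), Dom_removeCoach N K A → Pre_removeCoach N K A → Spec_removeCoach N K A (removeCoach N K A)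


-- ===== LEMMAS AND PROOFS =====

-- the erase loop is one filter on the items list
theorem pv_foldl_erase_eq_filter {κ ν β : Type} [BEq κ] (p : β → Bool) (k : β → κ)
    (l : List β) (d : PySem.Dict κ ν) :
    (l.foldl (fun d i => if p i then d.erase (k i) else d) d).items
      = d.items.filter (fun pr => l.all (fun i => !(p i) || !(pr.1 == k i))) := by
  induction l generalizing d with
  | nil => simp
  | cons i l ih =>
    simp only [List.foldl_cons, ih, List.all_cons]
    by_cases hp : p i = true
    · simp only [hp, if_true, PySem.Dict.erase, List.filter_filter,
        Bool.not_true, Bool.false_or]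
      exact List.filter_congr (fun a _ => Bool.and_comm _ _)
    · simp only [Bool.not_eq_true] at hp
      simp [hp]

-- pyGetD on pvAlphabet is injective below index 26
theorem pv_key_inj (i j : Int) (hi0 : 0 ≤ i) (hi : i < 26) (hj0 : 0 ≤ j) (hj : j < 26)
    (h : PySem.List.pyGetD pvAlphabet i "" = PySem.List.pyGetD pvAlphabet j "") : i = j := by
  have h26 : ((pvAlphabet.length : Int)) = 26 := by rfl
  rw [PySem.List.pyGetD_eq_getElem pvAlphabet "" hi0 (by omega),
      PySem.List.pyGetD_eq_getElem pvAlphabet "" hj0 (by omega)] at h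
  have hnd : pvAlphabet.Nodup := by decide
  have := (List.Nodup.getElem_inj_iff hnd).mp h
  omega

-- B's selection pass is the filter-then-project of the zipped pairs
theorem pvSelect_eq_filter (K : Int) (l : List (String × Int)) :
    pvSelect K l = (l.filter (fun p => decide (K ≤ p.2))).map Prod.fst := by
  induction l with
  | nil => rfl
  | cons p rest ih =>
    obtain ⟨c, v⟩ := p
    by_cases h : K ≤ v <;> simp [pvSelect, h, ih]

-- index-based selection over range equals pair-based selection over zip
theorem pv_range_select_eq_zip (K : Int) (ys : List Int) (xs : List String)
    (h : ys.length ≤ xs.length) :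
    ((List.range ys.length).filter (fun j => decide (K ≤ ys.getD j 0))).map (fun j => xs.getD j "")
      = ((xs.zip ys).filter (fun p => decide (K ≤ p.2))).map Prod.fst := by
  induction ys generalizing xs with
  | nil => simp
  | cons a t ih =>
    cases xs with
    | nil => simp at h
    | cons x xt =>
      have htail : ((List.range t.length).filter
            ((fun j => decide (K ≤ (a :: t).getD j 0)) ∘ Nat.succ)).map
            ((fun j => (x :: xt).getD j "") ∘ Nat.succ)
          = ((xt.zip t).filter (fun p => decide (K ≤ p.2))).map Prod.fst := by
        have hx : ((fun j => decide (K ≤ (a :: t).getD j 0)) ∘ Nat.succ)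
            = fun j => decide (K ≤ t.getD j 0) := by
          funext j; simp [Function.comp]
        have hy : ((fun j => (x :: xt).getD j "") ∘ Nat.succ)
            = fun j => xt.getD j "" := by
          funext j; simp [Function.comp]
        rw [hx, hy]
        exact ih xt (by simpa using h)
      simp only [List.length_cons, List.range_succ_eq_map, List.zip_cons_cons]
      rw [List.filter_cons, List.filter_cons, List.filter_map]
      simp only [List.getD_cons_zero]
      by_cases hK : K ≤ a
      · rw [if_pos (by simp [hK]), if_pos (by simp [hK])]
        simp only [List.map_cons, List.map_map, List.getD_cons_zero]
        rw [htail]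
      · rw [if_neg (by simp [hK]), if_neg (by simp [hK])]
        rw [List.map_map, htail]

-- A's surviving key list equals B's selection over the zipped pairs
theorem pv_bridge (K : Int) (A : List Int) (h : A.length ≤ 26) :
    ((PySem.List.pyRange 0 (A.length : Int) 1).filter
        (fun i => !decide (PySem.List.pyGetD A i 0 < K))).map
      (fun i => PySem.List.pyGetD pvAlphabet i "")
      = pvSelect K (pvAlphabet.zip A) := by
  rw [pvSelect_eq_filter, ← pv_range_select_eq_zip K A pvAlphabet (by simpa using h)]
  have hr : PySem.List.pyRange 0 ((A.length : Int)) 1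
      = (List.range A.length).map Int.ofNat := by
    rw [PySem.List.pyRange_one]
    rw [show (((A.length : Int)) - 0).toNat = A.length from by omega]
    exact List.map_congr_left (fun k _ => by simp)
  rw [hr, List.filter_map, List.map_map]
  have hfil : (List.range A.length).filter
        ((fun i => !decide (PySem.List.pyGetD A i 0 < K)) ∘ Int.ofNat)
      = (List.range A.length).filter (fun j => decide (K ≤ A.getD j 0)) := by
    apply List.filter_congr
    intro j _
    simp [Function.comp, ← decide_not, not_lt, PySem.List.pyGetD_natCast]
  rw [hfil]
  apply List.map_congr_left
  intro j _
  simp [Function.comp, PySem.List.pyGetD_natCast]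

theorem removeCoach_eq_alt (N : Int) (K : Int) (A : List Int) (hlen : A.length ≤ 26) :
    removeCoach N K A = removeCoach_alt N K A := by
  unfold removeCoach removeCoach_alt
  set n : Int := (A.length : Int) with hn
  set k : Int → String := fun i => PySem.List.pyGetD pvAlphabet i "" with hk
  set v : Int → Int := fun i => PySem.List.pyGetD A i 0 with hv
  have hmem : ∀ i ∈ PySem.List.pyRange 0 n 1, 0 ≤ i ∧ i < 26 := by
    intro i hi
    have := (PySem.List.mem_pyRange_one).mp hi
    omega
  have hinj : ∀ i ∈ PySem.List.pyRange 0 n 1, ∀ j ∈ PySem.List.pyRange 0 n 1, k i = k j → i = j := by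
    intro i hi j hj hkij
    obtain ⟨hi0, hi26⟩ := hmem i hi
    obtain ⟨hj0, hj26⟩ := hmem j hj
    exact pv_key_inj i j hi0 hi26 hj0 hj26 hkij
  -- phase 1: the insert loop over fresh distinct keys
  have h1 : ((PySem.List.pyRange 0 n 1).foldl
      (fun d i => d.insert (k i) (v i)) PySem.Dict.empty).items
      = (PySem.List.pyRange 0 n 1).map (fun i => (k i, v i)) := by
    rw [PySem.Dict.items_foldl_insert_fresh (PySem.List.pyRange 0 n 1) k v PySem.Dict.empty
      (by intro a _; simp [PySem.Dict.contains_empty])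
      ((PySem.List.nodup_pyRange_one 0 n).map_on hinj)]
    rfl
  -- phase 2: the erase loop filters exactly the indices with A[i] < K
  have h2 : (((PySem.List.pyRange 0 n 1).foldl
        (fun d i => if v i < K then d.erase (k i) else d)
        ((PySem.List.pyRange 0 n 1).foldl (fun d i => d.insert (k i) (v i)) PySem.Dict.empty)).items)
      = ((PySem.List.pyRange 0 n 1).filter (fun i => !decide (v i < K))).map (fun i => (k i, v i)) := by
    have := pv_foldl_erase_eq_filter (fun i => decide (v i < K)) k (PySem.List.pyRange 0 n 1)
      ((PySem.List.pyRange 0 n 1).foldl (fun d i => d.insert (k i) (v i)) PySem.Dict.empty)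
    simp only [decide_eq_true_eq] at this
    rw [this, h1, List.filter_map]
    congr 1
    apply List.filter_congr
    intro i hi
    simp only [Function.comp]
    by_cases hp : v i < K
    · simp only [hp, decide_true, Bool.not_true]
      rw [List.all_eq_false.mpr ⟨i, hi, by simp [hp]⟩]
    · simp only [hp, decide_false, Bool.not_false]
      rw [List.all_eq_true.mpr ?_]
      intro j hj
      by_cases hq : v j < K
      · have : ¬ (k i == k j) = true := by
          intro hb
          have : i = j := hinj i hi j hj (by simpa using hb)
          exact hp (this ▸ hq)
        simp [hq, this]
      · simp [hq]
  -- the result lists coincide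
  simp only
  rw [show (fun (d : PySem.Dict String Int) (i : Int) =>
        if PySem.List.pyGetD A i 0 < K then d.erase (PySem.List.pyGetD pvAlphabet i "") else d)
      = (fun d i => if v i < K then d.erase (k i) else d) from rfl]
  congr 1
  rw [show ∀ d : PySem.Dict String Int, (pvGetList d).map (fun value => value) = d.items.map Prod.fst
    from fun d => by simp [pvGetList, PySem.Dict.keys]]
  rw [h2, List.map_map]
  exact pv_bridge K A hlen

-- ===== VERDICT (by name: the statement is the Claim_ definition above) =====
theorem removeCoach_spec : Claim_equal_removeCoach := by
  intro N K A _ hpre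
  exact removeCoach_eq_alt N K A hpre
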